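-- pv_equiv track=rewrite | github.com/davidfdzmorilla/pharmacy-recommendation-system | raspberry_app/api/prompt_builder.py | generate_otc_catalog
-- ===== SOURCE A (Python) =====
-- from typing import List, Dict, Optional
--
-- def generate_otc_catalog(otc_products: List[Dict]) -> str:
--     """
--     Generate dynamic OTC catalog from database products.
--
--     Args:
--         otc_products: List of OTC products from database, each with:
--             - name: Product name
--             - category: Product category
--
--     Returns:
--         Formatted catalog string for system prompt
--
--     Example:
--         >>> products = [
--         ...     {"name": "Almax 1g", "category": "Digestivos"},
--         ...     {"name": "Vitamina C 1000mg", "category": "Vitaminas"}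
--         ... ]
--         >>> catalog = PromptBuilder.generate_otc_catalog(products)
--     """
--     if not otc_products:
--         return "CATÁLOGO DE PRODUCTOS OTC DISPONIBLES: (vacío)"
--
--     # Group products by category
--     products_by_category = {}
--     for product in otc_products:
--         category = product.get('category', 'Sin categoría')
--         name = product.get('name', 'Producto desconocido')
--
--         if category not in products_by_category:
--             products_by_category[category] = []
--
--         products_by_category[category].append(name)
--
--     # Build catalog text
--     catalog_lines = ["CATÁLOGO DE PRODUCTOS OTC DISPONIBLES (USA SOLO ESTOS NOMBRES EXACTOS):"]
--     catalog_lines.append("")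
--
--     for category in sorted(products_by_category.keys()):
--         catalog_lines.append(f"{category} OTC:")
--         for product_name in sorted(products_by_category[category]):
--             catalog_lines.append(f"- {product_name}")
--         catalog_lines.append("")
--
--     return "\n".join(catalog_lines)
-- ===== SOURCE B (Python) =====
-- def generate_otc_catalog(otc_products):
--     if not otc_products:
--         return "CATÁLOGO DE PRODUCTOS OTC DISPONIBLES: (vacío)"
--
--     # One flat sort of (category, name) pairs, then a single grouped pass.
--     pairs = sorted(
--         (p.get('category', 'Sin categoría'), p.get('name', 'Producto desconocido'))
--         for p in otc_products
--     )
--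
--     lines = ["CATÁLOGO DE PRODUCTOS OTC DISPONIBLES (USA SOLO ESTOS NOMBRES EXACTOS):", ""]
--     current = None
--     for category, name in pairs:
--         if current != category:
--             if current is not None:
--                 lines.append("")
--             lines.append(f"{category} OTC:")
--             current = category
--         lines.append(f"- {name}")
--     lines.append("")
--     return "\n".join(lines)
-- ===== Notes on version B (the rewrite author's own statement) =====
-- stated objective: alternative
-- what changed: Replaces the category->names dict grouping plus a per-category sort inside the output loop by one flat sort of all (category, name) pairs followed by a single grouped pass that emits a header whenever the category changes.
import Mathlib
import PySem

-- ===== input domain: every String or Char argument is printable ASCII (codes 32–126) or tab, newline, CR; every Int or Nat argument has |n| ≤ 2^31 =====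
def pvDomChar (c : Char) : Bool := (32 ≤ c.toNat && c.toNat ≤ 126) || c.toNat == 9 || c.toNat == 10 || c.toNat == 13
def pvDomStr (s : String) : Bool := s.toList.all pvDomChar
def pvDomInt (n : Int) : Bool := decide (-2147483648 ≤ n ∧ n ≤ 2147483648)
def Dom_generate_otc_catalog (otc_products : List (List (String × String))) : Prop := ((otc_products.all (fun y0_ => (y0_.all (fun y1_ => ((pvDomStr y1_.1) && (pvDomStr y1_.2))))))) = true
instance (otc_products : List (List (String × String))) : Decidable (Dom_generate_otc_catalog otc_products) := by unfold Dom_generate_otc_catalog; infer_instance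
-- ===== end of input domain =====

-- B replaces A's dict grouping (plus per-category sorts) by one flat sort of (category, name)
-- pairs and a single grouped pass; same return value, no speed claim ("alternative").

-- product.get('category', 'Sin categoría') / product.get('name', 'Producto desconocido'),
-- shared by both ports (both Pythons call .get with the same defaults)
def pvCat (p : List (String × String)) : String :=
  (PySem.Dict.mk p).getD "category" "Sin categoría"
def pvName (p : List (String × String)) : String :=
  (PySem.Dict.mk p).getD "name" "Producto desconocido"

-- ===== PORT A =====
def generate_otc_catalog (otc_products : List (List (String × String))) : String :=
  if otc_products = [] then "CATÁLOGO DE PRODUCTOS OTC DISPONIBLES: (vacío)"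
  else
    -- group products by category
    let d : PySem.Dict String (List String) := otc_products.foldl (fun d product =>
      let category := pvCat product
      let name := pvName product
      let d := if d.contains category then d else d.insert category []
      d.insert category (d.getD category [] ++ [name])) PySem.Dict.empty
    -- build catalog text
    let lines : List String := ["CATÁLOGO DE PRODUCTOS OTC DISPONIBLES (USA SOLO ESTOS NOMBRES EXACTOS):", ""]
    let lines := (PySem.List.sorted d.keys (fun c => c)).foldl (fun lines category =>
      let lines := lines ++ [category ++ " OTC:"]
      let lines := lines ++ (PySem.List.sorted (d.getD category []) (fun n => n)).map (fun n => "- " ++ n)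
      lines ++ [""]) lines
    PySem.Str.join "\n" lines

-- ===== PORT B =====
-- the body of B's 'for category, name in pairs' loop (state = (lines, current))
def pvStep (s : List String × Option String) (q : String × String) : List String × Option String :=
  let s :=
    if s.2 ≠ some q.1 then
      ((s.1 ++ (if s.2.isSome then [""] else [])) ++ [q.1 ++ " OTC:"], some q.1)
    else s
  (s.1 ++ ["- " ++ q.2], s.2)

def generate_otc_catalog_alt (otc_products : List (List (String × String))) : String :=
  if otc_products = [] then "CATÁLOGO DE PRODUCTOS OTC DISPONIBLES: (vacío)"
  else
    -- Python tuple comparison is lexicographic: sorted(pairs) = sort with key toLex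
    let pairs := PySem.List.sorted
      (otc_products.map (fun p => (pvCat p, pvName p))) (fun q => toLex q)
    let s := pairs.foldl pvStep
      (["CATÁLOGO DE PRODUCTOS OTC DISPONIBLES (USA SOLO ESTOS NOMBRES EXACTOS):", ""],
       (none : Option String))
    PySem.Str.join "\n" (s.1 ++ [""])

-- ===== PRECONDITION & SPEC =====
def Spec_generate_otc_catalog (otc_products : List (List (String × String))) (out : String) : Prop := out = generate_otc_catalog_alt otc_products
instance (otc_products : List (List (String × String))) (out : String) : Decidable (Spec_generate_otc_catalog otc_products out) := by unfold Spec_generate_otc_catalog; infer_instance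

-- ===== CLAIM (what is proved, stated in full; the proofs are below) =====
def Claim_equal_generate_otc_catalog : Prop := ∀ (otc_products : List (List (String × String))), Dom_generate_otc_catalog otc_products → Spec_generate_otc_catalog otc_products (generate_otc_catalog otc_products)

-- ===== LEMMAS AND PROOFS =====

-- names grouped under category c, in input order
def pvNames (pairs : List (String × String)) (c : String) : List String :=
  (pairs.filter (fun q => q.1 == c)).map (·.2)

-- A's grouping-loop body is Dict.modify
lemma pvGroup_body (d : PySem.Dict String (List String)) (c n : String) :
    (let d' := if d.contains c then d else d.insert c []
     d'.insert c (d'.getD c [] ++ [n])) = d.modify c [] (· ++ [n]) := by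
  by_cases h : d.contains c
  · simp only [h, if_true, PySem.Dict.modify]
  · simp only [h, if_false, Bool.false_eq_true, PySem.Dict.modify,
      PySem.Dict.getD_insert_self, PySem.Dict.insert_insert_self, List.nil_append,
      PySem.Dict.getD_of_not_contains d [] (Bool.of_not_eq_true h)]

-- groups laid flat are a permutation of the original pairs
lemma pvPerm_flatMap_filter : ∀ (cs : List String) (l : List (String × String)),
    cs.Nodup → (∀ q ∈ l, q.1 ∈ cs) →
    (cs.flatMap (fun c => l.filter (fun q => q.1 == c))).Perm l := by
  intro cs
  induction cs with
  | nil =>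
    intro l _ hl
    have : l = [] := List.eq_nil_iff_forall_not_mem.mpr (fun q hq => by simpa using hl q hq)
    simp [this]
  | cons c cs ih =>
    intro l hnd hl
    have hsub : ∀ c' ∈ cs, l.filter (fun q => q.1 == c')
        = (l.filter (fun q => !(q.1 == c))).filter (fun q => q.1 == c') := by
      intro c' hc'
      rw [List.filter_filter]
      apply List.filter_congr
      intro q hq
      by_cases h : q.1 = c'
      · have hcc : c' ≠ c := fun e => (List.nodup_cons.mp hnd).1 (e ▸ hc')
        simp [h, hcc]
      · simp [h]
    have hflat : cs.flatMap (fun c' => l.filter (fun q => q.1 == c'))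
        = cs.flatMap (fun c' => (l.filter (fun q => !(q.1 == c))).filter (fun q => q.1 == c')) := by
      rw [List.flatMap_def, List.flatMap_def, List.map_congr_left hsub]
    rw [List.flatMap_cons, hflat]
    have ih' := ih (l.filter (fun q => !(q.1 == c))) (List.nodup_cons.mp hnd).2
      (fun q hq => by
        have hm := List.mem_of_mem_filter hq
        have := hl q hm
        have hne : ¬ (q.1 == c) = true := by
          have := (List.mem_filter.mp hq).2; simpa using this
        simp only [List.mem_cons] at this
        rcases this with h | h
        · exact absurd (by simp [h]) hne
        · exact h)
    exact (ih'.append_left _).trans (List.filter_append_perm _ l)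

-- the flat lexicographic sort of the pairs is exactly the sorted groups laid out flat
lemma pvSorted_flat (pairs : List (String × String)) :
    PySem.List.sorted pairs (fun q => toLex q)
      = (PySem.List.sorted (PySem.Set.ofList (pairs.map (·.1))) (fun c => c)).flatMap
          (fun c => (PySem.List.sorted (pvNames pairs c) (fun n => n)).map (fun n => (c, n))) := by
  set cs := PySem.List.sorted (PySem.Set.ofList (pairs.map (·.1))) (fun c => c) with hcs
  have hperm_cs : cs.Perm (PySem.Set.ofList (pairs.map (·.1))) :=
    PySem.List.sorted_perm _ _ _
  have hnd_cs : cs.Nodup := hperm_cs.symm.nodup (PySem.Set.nodup_ofList _)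
  have hle_cs : cs.Pairwise (· ≤ ·) := PySem.List.sorted_pairwise _ _
  have hlt_cs : cs.Pairwise (· < ·) := by
    have := hle_cs.and hnd_cs
    exact this.imp (fun h => lt_of_le_of_ne h.1 h.2)
  have hmem : ∀ q ∈ pairs, q.1 ∈ cs := by
    intro q hq
    exact hperm_cs.mem_iff.mpr (by
      rw [PySem.Set.mem_ofList]
      exact List.mem_map.mpr ⟨q, hq, rfl⟩)
  have hblock : ∀ c, ((PySem.List.sorted (pvNames pairs c) (fun n => n)).map
      (fun n => (c, n))).Perm (pairs.filter (fun q => q.1 == c)) := by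
    intro c
    have h1 : ((PySem.List.sorted (pvNames pairs c) (fun n => n)).map
        (fun n => (c, n))).Perm ((pvNames pairs c).map (fun n => (c, n))) :=
      (PySem.List.sorted_perm _ _ _).map _
    have h2 : (pvNames pairs c).map (fun n => (c, n)) = pairs.filter (fun q => q.1 == c) := by
      rw [pvNames, List.map_map]
      have : ∀ q ∈ pairs.filter (fun q => q.1 == c),
          ((fun n => (c, n)) ∘ (·.2)) q = q := by
        intro q hq
        have := (List.mem_filter.mp hq).2
        have h := eq_of_beq this
        exact Prod.ext (by simp [← h]) rfl
      rw [List.map_congr_left this]; simp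
    rw [h2] at h1
    exact h1
  have hperm : ((cs.flatMap (fun c => (PySem.List.sorted (pvNames pairs c) (fun n => n)).map
      (fun n => (c, n))))).Perm pairs := by
    have h1 : (cs.flatMap (fun c => (PySem.List.sorted (pvNames pairs c) (fun n => n)).map
        (fun n => (c, n)))).Perm (cs.flatMap (fun c => pairs.filter (fun q => q.1 == c))) := by
      clear hlt_cs hle_cs hnd_cs hperm_cs hmem hcs
      induction cs with
      | nil => simp
      | cons c cs ih => simpa using (hblock c).append ih
    exact h1.trans (pvPerm_flatMap_filter cs pairs hnd_cs hmem)
  have hsortL : (PySem.List.sorted pairs (fun q => toLex q)).Pairwise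
      (fun a b => toLex a ≤ toLex b) := PySem.List.sorted_pairwise _ _
  have hsortR : (cs.flatMap (fun c => (PySem.List.sorted (pvNames pairs c) (fun n => n)).map
      (fun n => (c, n)))).Pairwise (fun a b => toLex a ≤ toLex b) := by
    rw [List.pairwise_flatMap]
    constructor
    · intro c _
      rw [List.pairwise_map]
      have := PySem.List.sorted_pairwise (pvNames pairs c) (fun n => n)
      exact this.imp (fun h => by
        rw [Prod.Lex.le_iff]
        exact Or.inr ⟨rfl, h⟩)
    · exact hlt_cs.imp (fun hcc => by
        intro x hx y hy
        obtain ⟨m, _, rfl⟩ := List.mem_map.mp hx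
        obtain ⟨n, _, rfl⟩ := List.mem_map.mp hy
        rw [Prod.Lex.le_iff]
        exact Or.inl hcc)
  exact List.Perm.eq_of_pairwise
    (fun a b _ _ h1 h2 => toLex.injective (le_antisymm h1 h2))
    hsortL hsortR ((PySem.List.sorted_perm _ _ _).trans hperm.symm)

-- walking pairs that all share category c, with current = c, just appends the names
lemma pvWalk_same (ns : List String) (c : String) : ∀ (lines : List String),
    (ns.map (fun n => (c, n))).foldl pvStep (lines, some c)
      = (lines ++ ns.map (fun n => "- " ++ n), some c) := by
  induction ns with
  | nil => simp
  | cons n ns ih =>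
    intro lines
    simp only [List.map_cons, List.foldl_cons, pvStep, ne_eq, not_true_eq_false, if_false,
      ih, List.append_assoc, List.cons_append, List.nil_append]

-- entering a fresh nonempty group emits (optional blank,) header, then the names
lemma pvWalk_fresh (ns : List String) (c : String) (lines : List String) (cur : Option String)
    (h : cur ≠ some c) (hns : ns ≠ []) :
    (ns.map (fun n => (c, n))).foldl pvStep (lines, cur)
      = (lines ++ (if cur.isSome then [""] else []) ++ [c ++ " OTC:"] ++ ns.map (fun n => "- " ++ n),
         some c) := by
  cases ns with
  | nil => exact absurd rfl hns
  | cons n ns =>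
    simp only [List.map_cons, List.foldl_cons, pvStep, ne_eq, h, not_false_iff, if_true,
      pvWalk_same, List.append_assoc, List.cons_append, List.nil_append]

-- walking the remaining groups: one blank line before each header
lemma pvWalk_groups (cs : List String) (g : String → List String) :
    ∀ (c₀ : String) (lines : List String), c₀ ∉ cs → cs.Nodup → (∀ c ∈ cs, g c ≠ []) →
    (cs.flatMap (fun c => (g c).map (fun n => (c, n)))).foldl pvStep (lines, some c₀)
      = (lines ++ cs.flatMap (fun c => [""] ++ [c ++ " OTC:"] ++ (g c).map (fun n => "- " ++ n)),
         some (cs.getLastD c₀)) := by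
  induction cs with
  | nil => simp
  | cons c cs ih =>
    intro c₀ lines hc₀ hnd hg
    have hne : (some c₀ : Option String) ≠ some c := by
      simp only [List.mem_cons] at hc₀; simp; intro e; exact hc₀ (Or.inl e)
    rw [List.flatMap_cons, List.foldl_append,
      pvWalk_fresh _ _ _ _ hne (hg c (List.mem_cons_self)),
      ih c _ (by have := List.nodup_cons.mp hnd; exact this.1)
        (by have := List.nodup_cons.mp hnd; exact this.2)
        (fun c' hc' => hg c' (List.mem_cons_of_mem _ hc'))]
    simp [List.append_assoc]
    cases cs with
    | nil => simp
    | cons hd tl =>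
      simp [List.getLast?_eq_some_getLast (l := hd :: tl) (by simp)]

-- trailing blank after each block = leading blank before each later block plus a final blank
lemma pvBlank_shift (cs : List String) (h : String → List String) :
    [""] ++ cs.flatMap (fun c => h c ++ [""])
      = cs.flatMap (fun c => [""] ++ h c) ++ [""] := by
  induction cs with
  | nil => simp
  | cons c cs ih => simp only [List.flatMap_cons, List.append_assoc] at *; rw [ih]

-- ===== VERDICT (by name: the statement is the Claim_ definition above) =====
theorem generate_otc_catalog_spec : Claim_equal_generate_otc_catalog := by
  intro xs _
  unfold Spec_generate_otc_catalog generate_otc_catalog generate_otc_catalog_alt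
  by_cases hxs : xs = []
  · simp [hxs]
  · simp only [hxs, if_false]
    set pairs := xs.map (fun p => (pvCat p, pvName p)) with hpairs
    -- A's dict
    have hbody : (fun (d : PySem.Dict String (List String)) product =>
        let category := pvCat product
        let name := pvName product
        let d := if d.contains category then d else d.insert category []
        d.insert category (d.getD category [] ++ [name]))
      = (fun d product => d.modify (pvCat product) [] (· ++ [pvName product])) := by
      funext d p
      exact pvGroup_body d (pvCat p) (pvName p)
    rw [hbody]
    set d := xs.foldl (fun d product => d.modify (pvCat product) [] (· ++ [pvName product]))
      PySem.Dict.empty with hd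
    have hd2 : d = pairs.foldl (fun d q => d.modify q.1 [] (· ++ [q.2])) PySem.Dict.empty := by
      rw [hpairs, List.foldl_map]
    have hgetD : ∀ c, d.getD c [] = pvNames pairs c := by
      intro c
      rw [hd2, PySem.Dict.getD_foldl_modify_append, PySem.Dict.getD_empty, List.nil_append, pvNames]
    have hkeys : d.keys = PySem.Set.ofList (pairs.map (·.1)) := by
      rw [hd2, PySem.Dict.keys_foldl_modify_key, PySem.Dict.keys_empty, PySem.Set.update_nil_left]
    -- A's output loop, as a flatMap
    have hbodyA : (fun (lines : List String) category =>
        let lines := lines ++ [category ++ " OTC:"]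
        let lines := lines ++ (PySem.List.sorted (d.getD category []) (fun n => n)).map (fun n => "- " ++ n)
        lines ++ [""])
      = fun (lines : List String) c => lines ++ ([c ++ " OTC:"]
          ++ (PySem.List.sorted (pvNames pairs c) (fun n => n)).map (fun n => "- " ++ n) ++ [""]) := by
      funext lines c
      simp [hgetD c, List.append_assoc]
    rw [hbodyA, PySem.List.foldl_append_eq_flatMap, hkeys]
    -- B's sorted pair list, as the same groups laid out flat
    rw [pvSorted_flat pairs]
    set cs := PySem.List.sorted (PySem.Set.ofList (pairs.map (·.1))) (fun c => c) with hcseq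
    have hperm_cs : cs.Perm (PySem.Set.ofList (pairs.map (·.1))) := PySem.List.sorted_perm _ _ _
    have hnd_cs : cs.Nodup := hperm_cs.symm.nodup (PySem.Set.nodup_ofList _)
    have hpairs_ne : pairs ≠ [] := by
      rw [hpairs]; simpa [List.map_eq_nil_iff] using hxs
    have hg : ∀ c ∈ cs, PySem.List.sorted (pvNames pairs c) (fun n => n) ≠ [] := by
      intro c hc
      have hc' : c ∈ PySem.Set.ofList (pairs.map (·.1)) := hperm_cs.mem_iff.mp hc
      rw [PySem.Set.mem_ofList] at hc'
      obtain ⟨q, hq, hq1⟩ := List.mem_map.mp hc'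
      intro hnil
      have : q.2 ∈ PySem.List.sorted (pvNames pairs c) (fun n => n) := by
        rw [PySem.List.mem_sorted, pvNames]
        exact List.mem_map.mpr ⟨q, List.mem_filter.mpr ⟨hq, by simp [hq1]⟩, rfl⟩
      rw [hnil] at this
      exact absurd this (List.not_mem_nil)
    cases hcc : cs with
    | nil =>
      exfalso
      obtain ⟨q, hq⟩ := List.exists_mem_of_ne_nil pairs hpairs_ne
      have : q.1 ∈ cs := hperm_cs.mem_iff.mpr
        (by rw [PySem.Set.mem_ofList]; exact List.mem_map.mpr ⟨q, hq, rfl⟩)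
      rw [hcc] at this
      exact absurd this (List.not_mem_nil)
    | cons c cs' =>
      rw [hcc] at hg hnd_cs
      have hnd' := List.nodup_cons.mp hnd_cs
      simp only [List.flatMap_cons]
      rw [List.foldl_append,
        pvWalk_fresh _ _ _ none (by simp) (hg c List.mem_cons_self),
        pvWalk_groups cs' _ c _ hnd'.1 hnd'.2 (fun c' hc' => hg c' (List.mem_cons_of_mem _ hc'))]
      -- both are joins of the same line list
      apply congrArg
      have := pvBlank_shift cs' (fun c => [c ++ " OTC:"]
        ++ (PySem.List.sorted (pvNames pairs c) (fun n => n)).map (fun n => "- " ++ n))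
      simp only [List.append_assoc] at *
      rw [← this]
      simp
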